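-- pv_equiv track=rewrite | github.com/rmoskwa/crawl4ai-local-model-embedding | src/utils.py | validate_content_for_regex
-- ===== SOURCE A (Python) =====
-- def validate_content_for_regex(content: str, max_length: int = 1000000) -> str:
--     """
--     Validate and sanitize content before regex processing to prevent attacks.
--
--     Args:
--         content: Content to validate
--         max_length: Maximum allowed content length
--
--     Returns:
--         Validated content
--
--     Raises:
--         ValueError: If content is invalid or too large
--     """
--     if not isinstance(content, str):
--         raise ValueError("Content must be a string")
--
--     if len(content) > max_length:
--         raise ValueError(f"Content too large: {len(content)} > {max_length} characters")
--
--     # Truncate extremely long lines that could cause ReDoS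
--     lines = content.split("\n")
--     sanitized_lines = []
--     for line in lines:
--         if len(line) > 10000:  # Truncate lines longer than 10k chars
--             line = line[:10000] + "...[truncated]"
--         sanitized_lines.append(line)
--
--     return "\n".join(sanitized_lines)
-- ===== SOURCE B (Python) =====
-- def _flush(run):
--     if len(run) > 10000:
--         return "".join(run[:10000]) + "...[truncated]"
--     return "".join(run)
--
--
-- def validate_content_for_regex(content: str, max_length: int = 1000000) -> str:
--     if not isinstance(content, str):
--         raise ValueError("Content must be a string")
--
--     if len(content) > max_length:
--         raise ValueError(f"Content too large: {len(content)} > {max_length} characters")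
--
--     # Single streaming pass over the characters: maintain the current run of
--     # non-newline characters, emit it (truncated if needed) at each newline and
--     # at the end.  No list of lines is built and no "\n".join happens.
--     pieces = []
--     run = []
--     for ch in content:
--         if ch == "\n":
--             pieces.append(_flush(run))
--             pieces.append("\n")
--             run = []
--         else:
--             run.append(ch)
--     pieces.append(_flush(run))
--     return "".join(pieces)
-- ===== Notes on version B (the rewrite author's own statement) =====
-- stated objective: alternative
-- what changed: Replaces A's split-into-lines, truncate-each-line loop and newline join with one streaming pass over the characters that maintains the current non-newline run and emits it (truncated if over 10000 chars) at each line boundary and at the end, never building a list of lines.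
import Mathlib
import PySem

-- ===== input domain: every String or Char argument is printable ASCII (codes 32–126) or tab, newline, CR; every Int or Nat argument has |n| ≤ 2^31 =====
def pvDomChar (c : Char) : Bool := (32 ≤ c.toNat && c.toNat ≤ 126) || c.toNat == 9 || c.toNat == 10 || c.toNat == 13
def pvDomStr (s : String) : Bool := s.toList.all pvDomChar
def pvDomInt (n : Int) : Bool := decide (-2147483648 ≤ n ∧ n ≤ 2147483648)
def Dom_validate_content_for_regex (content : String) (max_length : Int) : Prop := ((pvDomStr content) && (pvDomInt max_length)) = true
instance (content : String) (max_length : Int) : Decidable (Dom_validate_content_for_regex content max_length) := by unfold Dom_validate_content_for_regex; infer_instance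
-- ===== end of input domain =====

-- B replaces A's split/truncate-loop/join by one streaming pass over the characters (alternative decomposition, same cost).


-- ===== PORT A =====
-- line = line[:10000] + "...[truncated]" when len(line) > 10000   (line[:10000] = take 10000, exact for this nonnegative slice)
def pvTruncA (line : List Char) : List Char :=
  if line.length > 10000 then line.take 10000 ++ ("...[truncated]".toList) else line

def validate_content_for_regex (content : String) (max_length : Int) : String :=
  -- 'if len(content) > max_length: raise ValueError' — excluded by Pre_; the isinstance guard is vacuous under the type convention
  let _ := max_length
  -- lines = content.split("\n"): List.splitOn is exact for this nonempty one-char separator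
  let lines := content.toList.splitOn '\n'
  -- for line in lines: sanitized_lines.append(...)
  let sanitized := lines.foldl (fun acc line => acc ++ [pvTruncA line]) []
  -- "\n".join(sanitized_lines)
  String.mk (PySem.Chars.join ['\n'] sanitized)

-- ===== PORT B =====
-- _flush(run): emit the current run, truncated if longer than 10000
def pvFlushB (run : List Char) : List Char :=
  if run.length > 10000 then run.take 10000 ++ ("...[truncated]".toList) else run

-- the streaming for-loop of Source B: current non-newline run as accumulator, pieces concatenated as they are emitted
def pvScanB (run : List Char) : List Char → List Char
  | [] => pvFlushB run
  | c :: rest => if c = '\n' then pvFlushB run ++ '\n' :: pvScanB [] rest else pvScanB (run ++ [c]) rest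

def validate_content_for_regex_alt (content : String) (max_length : Int) : String :=
  -- the two raising guards of Source B are excluded by Pre_
  let _ := max_length
  String.mk (pvScanB [] content.toList)

-- ===== PRECONDITION & SPEC =====
-- Pre_ excludes exactly the inputs where A raises ValueError: len(content) > max_length
def Pre_validate_content_for_regex (content : String) (max_length : Int) : Prop :=
  (content.toList.length : Int) ≤ max_length
instance (content : String) (max_length : Int) : Decidable (Pre_validate_content_for_regex content max_length) := by unfold Pre_validate_content_for_regex; infer_instance

def pvWitness_validate_content_for_regex : String × Int := ("ab\ncd", 1000000)

def Spec_validate_content_for_regex (content : String) (max_length : Int) (out : String) : Prop := out = validate_content_for_regex_alt content max_length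
instance (content : String) (max_length : Int) (out : String) : Decidable (Spec_validate_content_for_regex content max_length out) := by unfold Spec_validate_content_for_regex; infer_instance

-- ===== CLAIM (what is proved, stated in full; the proofs are below) =====
def Claim_equal_validate_content_for_regex : Prop := ∀ (content : String) (max_length : Int), Dom_validate_content_for_regex content max_length → Pre_validate_content_for_regex content max_length → Spec_validate_content_for_regex content max_length (validate_content_for_regex content max_length)

-- ===== LEMMAS AND PROOFS =====
theorem pvTruncA_eq_flush : pvTruncA = pvFlushB := rfl

theorem foldl_append_map (l : List (List Char)) (acc : List (List Char)) :
    l.foldl (fun a x => a ++ [pvTruncA x]) acc = acc ++ l.map pvTruncA := by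
  induction l generalizing acc with
  | nil => simp
  | cons h t ih => simp [List.foldl, ih]

theorem pvScanB_spec (cs : List Char) (run : List Char) :
    pvScanB run cs
      = PySem.Chars.join ['\n'] (((cs.splitOn '\n').modifyHead (run ++ ·)).map pvFlushB) := by
  induction cs generalizing run with
  | nil => simp [pvScanB, PySem.Chars.join, List.intercalate]
  | cons c rest ih =>
    rcases h' : rest.splitOn '\n' with - | ⟨b, tl⟩
    · exact absurd h' (List.splitOnP_ne_nil _ rest)
    by_cases hc : c = '\n'
    · subst hc
      have ihx := ih []
      rw [h'] at ihx
      have hsplit : (('\n') :: rest).splitOn '\n' = [] :: rest.splitOn '\n' := by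
        simp [List.splitOn, List.splitOnP_cons]
      simp [pvScanB, hsplit, h', PySem.Chars.join_cons_cons, ihx]
    · have hsplit : (c :: rest).splitOn '\n' = (rest.splitOn '\n').modifyHead (List.cons c) := by
        simp [List.splitOn, List.splitOnP_cons, hc]
      simp only [pvScanB, if_neg hc]
      rw [ih, hsplit, List.modifyHead_modifyHead]
      have hfun : ((fun x => run ++ x) ∘ List.cons c) = (fun x => run ++ [c] ++ x) := by
        funext x; simp
      rw [hfun]

-- ===== VERDICT (by name: the statement is the Claim_ definition above) =====
theorem validate_content_for_regex_spec : Claim_equal_validate_content_for_regex := by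
  intro content max_length _ _
  unfold Spec_validate_content_for_regex validate_content_for_regex validate_content_for_regex_alt
  dsimp only
  rw [pvScanB_spec, foldl_append_map, pvTruncA_eq_flush]
  rcases h' : content.toList.splitOn '\n' with - | ⟨b, tl⟩
  · exact absurd h' (List.splitOnP_ne_nil _ _)
  · simp
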